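-- pv_equiv track=rewrite | github.com/chirag-dudhrejia/finance_audit_system | agents/categorizer_agent.py | _parse_batch_response
-- ===== SOURCE A (Python) =====
-- CATEGORIES = [
--     "Food & Dining",
--     "Transport",
--     "Shopping",
--     "Bills & Utilities",
--     "Entertainment",
--     "Health",
--     "Transfer",
--     "Bank Transfer",
--     "ATM Withdrawal",
--     "Education",
--     "Rent",
--     "Salary",
--     "Investment",
--     "Insurance",
--     "Subscriptions",
--     "Uncategorized",
-- ]
--
-- def _parse_batch_response(response: str, count: int) -> list[str]:
--     """Parse numbered batch response into a list of categories.
--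
--     Expected format:
--         1: Food & Dining
--         2: Transport
--         ...
--     """
--     categories = ["Uncategorized"] * count
--     for line in response.strip().splitlines():
--         line = line.strip()
--         if not line or ":" not in line:
--             continue
--         try:
--             parts = line.split(":", 1)
--             idx = int(parts[0].strip()) - 1
--             cat = parts[1].strip()
--             if 0 <= idx < count:
--                 categories[idx] = cat if cat in CATEGORIES else "Uncategorized"
--         except (ValueError, IndexError):
--             continue
--     return categories
-- ===== SOURCE B (Python) =====
-- CATEGORIES = [
--     "Food & Dining",
--     "Transport",
--     "Shopping",
--     "Bills & Utilities",
--     "Entertainment",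
--     "Health",
--     "Transfer",
--     "Bank Transfer",
--     "ATM Withdrawal",
--     "Education",
--     "Rent",
--     "Salary",
--     "Investment",
--     "Insurance",
--     "Subscriptions",
--     "Uncategorized",
-- ]
--
--
-- def _parse_line(line, count):
--     """Parse one 'idx: cat' line; None if it carries no usable entry."""
--     line = line.strip()
--     if not line or ":" not in line:
--         return None
--     num, rest = line.split(":", 1)
--     try:
--         idx = int(num.strip()) - 1
--     except ValueError:
--         return None
--     if not (0 <= idx < count):
--         return None
--     cat = rest.strip()
--     return idx, cat if cat in CATEGORIES else "Uncategorized"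
--
--
-- def _parse_batch_response(response: str, count: int) -> list[str]:
--     entries = (_parse_line(line, count) for line in response.strip().splitlines())
--     parsed = dict(e for e in entries if e is not None)
--     return [parsed.get(i, "Uncategorized") for i in range(count)]
-- ===== Notes on version B (the rewrite author's own statement) =====
-- stated objective: alternative
-- what changed: A fills a pre-initialized list in place while iterating the lines; B decomposes into a per-line parser returning optional (index, category) pairs, builds a dict from those pairs (last write wins, like A's overwrite), and produces the output list in a separate read-out pass.
import Mathlib
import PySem

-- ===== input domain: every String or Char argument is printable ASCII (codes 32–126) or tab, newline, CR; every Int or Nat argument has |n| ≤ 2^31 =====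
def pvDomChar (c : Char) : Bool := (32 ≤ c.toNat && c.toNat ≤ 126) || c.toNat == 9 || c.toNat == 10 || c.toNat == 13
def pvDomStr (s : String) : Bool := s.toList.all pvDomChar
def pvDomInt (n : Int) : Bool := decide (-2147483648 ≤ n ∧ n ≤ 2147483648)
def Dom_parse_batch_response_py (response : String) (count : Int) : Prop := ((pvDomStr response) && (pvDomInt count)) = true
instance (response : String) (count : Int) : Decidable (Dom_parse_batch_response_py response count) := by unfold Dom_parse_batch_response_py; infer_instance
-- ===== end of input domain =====

-- B replaces A's in-place fill of a pre-initialized list by a parse-to-pairs pass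
-- (one helper per line), a dict built from those pairs, and a separate read-out pass
-- (objective: simpler decomposition; same asymptotic cost).

def pvCATEGORIES : List String :=
  ["Food & Dining", "Transport", "Shopping", "Bills & Utilities", "Entertainment",
   "Health", "Transfer", "Bank Transfer", "ATM Withdrawal", "Education", "Rent",
   "Salary", "Investment", "Insurance", "Subscriptions", "Uncategorized"]

-- ===== PORT A =====
-- the try-block of A, split into helpers at the two caught-exception points;
-- 'line', 'idx', 'cat' are inlined (pure expressions); branches in A's order.
def pvLineA3 (count : Int) (categories : List String) (parts : List String) : Option Int → List String
  | none => categories                       -- ValueError from int(...), caught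
  | some n =>
    match PySem.List.pyGet? parts 1 with
    | none => categories                     -- IndexError from parts[1], caught
    | some p1 =>
      if 0 ≤ n - 1 && n - 1 < count then
        categories.set (n - 1).toNat
          (if pvCATEGORIES.contains (PySem.Str.strip p1) then PySem.Str.strip p1
           else "Uncategorized")
      else categories

def pvLineA2 (count : Int) (categories : List String) (parts : List String) : List String :=
  match PySem.List.pyGet? parts 0 with
  | none => categories                       -- IndexError from parts[0], caught
  | some p0 => pvLineA3 count categories parts (PySem.Int.ofStr? (PySem.Str.strip p0))

def pvLineA (count : Int) (categories : List String) (rawline : String) : List String :=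
  if PySem.Str.strip rawline = "" || !(PySem.Str.isIn ":" (PySem.Str.strip rawline)) then categories
  else
    match PySem.Str.splitMax? (PySem.Str.strip rawline) ":" 1 with
    | none => categories                     -- unreachable: sep ":" is nonempty
    | some parts => pvLineA2 count categories parts

def parse_batch_response_py (response : String) (count : Int) : List String :=
  (PySem.Str.splitlines (PySem.Str.strip response)).foldl (pvLineA count)
    (List.replicate count.toNat "Uncategorized")

-- ===== PORT B =====
-- 'num, rest = line.split(":", 1)' is the two-element pattern; the guarded int(...)
-- is the helper's Option argument; 'idx' and 'cat' are inlined.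
def pvEntry (count : Int) (rest : String) : Option Int → Option (Int × String)
  | none => none                             -- ValueError from int(...), caught
  | some n =>
    if 0 ≤ n - 1 && n - 1 < count then
      some (n - 1,
        if pvCATEGORIES.contains (PySem.Str.strip rest) then PySem.Str.strip rest
        else "Uncategorized")
    else none

def pvParseLine (line : String) (count : Int) : Option (Int × String) :=
  if PySem.Str.strip line = "" || !(PySem.Str.isIn ":" (PySem.Str.strip line)) then none
  else
    match PySem.Str.splitMax? (PySem.Str.strip line) ":" 1 with
    | some [num, rest] => pvEntry count rest (PySem.Int.ofStr? (PySem.Str.strip num))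
    | _ => none                              -- unpacking mismatch: unreachable under the guard

def parse_batch_response_py_alt (response : String) (count : Int) : List String :=
  let parsed := PySem.Dict.ofList
    ((PySem.Str.splitlines (PySem.Str.strip response)).filterMap (fun line => pvParseLine line count))
  (PySem.List.pyRange 0 count 1).map (fun i => parsed.getD i "Uncategorized")

-- ===== PRECONDITION & SPEC =====
def Spec_parse_batch_response_py (response : String) (count : Int) (out : List String) : Prop := out = parse_batch_response_py_alt response count
instance (response : String) (count : Int) (out : List String) : Decidable (Spec_parse_batch_response_py response count out) := by unfold Spec_parse_batch_response_py; infer_instance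

-- ===== CLAIM (what is proved, stated in full; the proofs are below) =====
def Claim_equal_parse_batch_response_py : Prop := ∀ (response : String) (count : Int), Dom_parse_batch_response_py response count → Spec_parse_batch_response_py response count (parse_batch_response_py response count)

-- ===== LEMMAS AND PROOFS =====

theorem pv_go_len (sep : List Char) :
    ∀ (fuel m : Nat) (l cur : List Char) (acc : List (List Char)),
      (PySem.Chars.splitOnMax.go sep fuel m l cur acc).length ≤ acc.length + m + 1 := by
  intro fuel
  induction fuel with
  | zero =>
    intro m l cur acc
    unfold PySem.Chars.splitOnMax.go
    simp
  | succ fuel ih =>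
    intro m l cur acc
    unfold PySem.Chars.splitOnMax.go
    cases l with
    | nil => simp
    | cons c rest =>
      by_cases hm : m = 0
      · simp [hm]
      · simp only [if_neg hm]
        by_cases hp : sep.isPrefixOf (c :: rest) = true
        · simp only [if_pos hp]
          have h2 := ih (m - 1) ((c :: rest).drop sep.length) [] (cur.reverse :: acc)
          simp only [List.length_cons] at h2
          omega
        · simp only [if_neg hp]
          exact ih m rest (c :: cur) acc

theorem pv_splitMax_len (line : String) (parts : List String)
    (h : PySem.Str.splitMax? line ":" 1 = some parts) : parts.length ≤ 2 := by
  have h2 : PySem.Chars.splitMax? line.toList [':'] 1 = some (parts.map String.toList) := by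
    have := PySem.Str.splitMax?_map line ":" 1
    rw [h] at this
    simpa using this.symm
  unfold PySem.Chars.splitMax? at h2
  simp at h2
  unfold PySem.Chars.splitOnMax at h2
  simp at h2
  have hg := pv_go_len [':'] (line.toList.length + 1) 1 line.toList [] []
  rw [show line.toList.length = line.length by simp] at hg
  rw [h2] at hg
  simpa using hg

def pvR (count : Int) (l : List String) (d : PySem.Dict Int String) : Prop :=
  l.length = count.toNat ∧ ∀ i : Nat, i < count.toNat → l[i]? = some (d.getD (i : Int) "Uncategorized")

def pvIns (d : PySem.Dict Int String) : Option (Int × String) → PySem.Dict Int String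
  | none => d
  | some kv => d.insert kv.1 kv.2

set_option maxHeartbeats 1000000 in
theorem pv_step (count : Int) (l : List String) (d : PySem.Dict Int String) (s : String)
    (h : pvR count l d) :
    pvR count (pvLineA count l s) (pvIns d (pvParseLine s count)) := by
  obtain ⟨hlen, hpt⟩ := h
  unfold pvLineA pvParseLine
  by_cases hg : (PySem.Str.strip s = "" || !(PySem.Str.isIn ":" (PySem.Str.strip s))) = true
  · rw [if_pos hg]; rw [if_pos hg]
    exact ⟨hlen, hpt⟩
  · rw [if_neg hg]; rw [if_neg hg]
    cases hp : PySem.Str.splitMax? (PySem.Str.strip s) ":" 1 with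
    | none => exact ⟨hlen, hpt⟩
    | some parts =>
      rcases parts with _ | ⟨p0, _ | ⟨p1, _ | ⟨p2, rest⟩⟩⟩
      · exact ⟨hlen, hpt⟩
      · show pvR count (pvLineA2 count l [p0]) d
        rw [show pvLineA2 count l [p0]
              = pvLineA3 count l [p0] (PySem.Int.ofStr? (PySem.Str.strip p0)) from rfl]
        cases PySem.Int.ofStr? (PySem.Str.strip p0) <;> exact ⟨hlen, hpt⟩
      · show pvR count (pvLineA2 count l [p0, p1])
            (pvIns d (pvEntry count p1 (PySem.Int.ofStr? (PySem.Str.strip p0))))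
        rw [show pvLineA2 count l [p0, p1]
              = pvLineA3 count l [p0, p1] (PySem.Int.ofStr? (PySem.Str.strip p0)) from rfl]
        cases hn : PySem.Int.ofStr? (PySem.Str.strip p0) with
        | none => exact ⟨hlen, hpt⟩
        | some n =>
          show pvR count
              (if 0 ≤ n - 1 && n - 1 < count then
                l.set (n - 1).toNat
                  (if pvCATEGORIES.contains (PySem.Str.strip p1) then PySem.Str.strip p1
                   else "Uncategorized")
              else l)
              (pvIns d (if 0 ≤ n - 1 && n - 1 < count then
                  some (n - 1,
                    if pvCATEGORIES.contains (PySem.Str.strip p1) then PySem.Str.strip p1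
                    else "Uncategorized")
                else none))
          by_cases hr : (0 ≤ n - 1 && n - 1 < count) = true
          · rw [if_pos hr]; rw [if_pos hr]
            have hb : 0 ≤ n - 1 ∧ n - 1 < count := by
              simpa [decide_eq_true_eq] using hr
            show pvR count _
              (d.insert (n - 1)
                (if pvCATEGORIES.contains (PySem.Str.strip p1) then PySem.Str.strip p1
                 else "Uncategorized"))
            refine ⟨by simpa using hlen, ?_⟩
            intro i hi
            rw [List.getElem?_set, PySem.Dict.getD_insert]
            by_cases he : (n - 1).toNat = i
            · have hii : (i : Int) = n - 1 := by omega
              rw [if_pos he, if_pos hii, if_pos (by omega : (n - 1).toNat < l.length)]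
            · have hii : ¬ ((i : Int) = n - 1) := by omega
              rw [if_neg he, if_neg hii]
              exact hpt i hi
          · rw [if_neg hr]; rw [if_neg hr]
            exact ⟨hlen, hpt⟩
      · have hle := pv_splitMax_len _ _ hp
        exfalso
        simp only [List.length_cons] at hle
        omega

theorem pv_fold (count : Int) :
    ∀ (lines : List String) (l : List String) (d : PySem.Dict Int String), pvR count l d →
      pvR count (lines.foldl (pvLineA count) l)
        ((lines.filterMap (fun s => pvParseLine s count)).foldl (fun d kv => d.insert kv.1 kv.2) d) := by
  intro lines
  induction lines with
  | nil => intro l d h; simpa using h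
  | cons s rest ih =>
    intro l d h
    have hs := pv_step count l d s h
    cases hp : pvParseLine s count with
    | none =>
      simp only [List.foldl_cons, List.filterMap_cons, hp]
      rw [hp] at hs
      exact ih _ _ hs
    | some kv =>
      simp only [List.foldl_cons, List.filterMap_cons, hp]
      rw [hp] at hs
      exact ih _ _ hs

theorem pv_init (count : Int) : pvR count (List.replicate count.toNat "Uncategorized") PySem.Dict.empty := by
  refine ⟨by simp, ?_⟩
  intro i hi
  rw [PySem.Dict.getD_empty]
  simp [hi]

theorem pv_ofList_foldl {κ ν : Type} [BEq κ] (ps : List (κ × ν)) :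
    PySem.Dict.ofList ps = ps.foldl (fun d kv => d.insert kv.1 kv.2) PySem.Dict.empty := by
  unfold PySem.Dict.ofList PySem.Dict.update
  rfl

theorem pv_final (count : Int) (l : List String) (d : PySem.Dict Int String)
    (h : pvR count l d) :
    l = (PySem.List.pyRange 0 count 1).map (fun i => d.getD i "Uncategorized") := by
  obtain ⟨hlen, hpt⟩ := h
  rw [PySem.List.pyRange_one]
  apply List.ext_getElem?
  intro i
  rw [List.getElem?_map, List.getElem?_map]
  by_cases hi : i < count.toNat
  · rw [hpt i hi]
    rw [List.getElem?_range (by omega)]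
    simp
  · rw [List.getElem?_eq_none (by omega)]
    rw [List.getElem?_eq_none (by simp; omega)]
    rfl

-- ===== VERDICT (by name: the statement is the Claim_ definition above) =====
theorem parse_batch_response_py_spec : Claim_equal_parse_batch_response_py := by
  unfold Claim_equal_parse_batch_response_py
  intro response count _
  unfold Spec_parse_batch_response_py parse_batch_response_py parse_batch_response_py_alt
  rw [pv_ofList_foldl]
  exact pv_final count _ _ (pv_fold count _ _ _ (pv_init count))
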